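-- pv_equiv track=rewrite | github.com/LeetCodeStudyGroup/LeetCode | 372.Super Pow.py | superPow
-- ===== SOURCE A (Python) =====
-- def superPow(a, b):
--     """
--     :type a: int
--     :type b: List[int]
--     :rtype: int
--     """
--     a %= 1337
--     base, val = a, 1
--     for i in range(len(b) - 1, -1, -1):
--         val *= base ** b[i]
--         val %= 1337
--         base = base ** 10 % 1337
--     return val
-- ===== SOURCE B (Python) =====
-- def superPow(a, b):
--     """
--     :type a: int
--     :type b: List[int]
--     :rtype: int
--     """
--     a %= 1337
--     result = 1
--     for d in b:
--         result = pow(result, 10, 1337) * pow(a, d, 1337) % 1337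
--     return result
-- ===== Notes on version B (the rewrite author's own statement) =====
-- stated objective: alternative
-- what changed: Horner's method over the digits left-to-right, maintaining the running answer itself (result = result^10 * a^d mod 1337) with built-in modular pow, instead of A's right-to-left scan that maintains a separately squared-to-the-10th base power and multiplies full integer powers before reducing.
-- outside the precondition, e.g. on superPow(2, [-1]): A returns 0.5, B returns 669
import Mathlib
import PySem

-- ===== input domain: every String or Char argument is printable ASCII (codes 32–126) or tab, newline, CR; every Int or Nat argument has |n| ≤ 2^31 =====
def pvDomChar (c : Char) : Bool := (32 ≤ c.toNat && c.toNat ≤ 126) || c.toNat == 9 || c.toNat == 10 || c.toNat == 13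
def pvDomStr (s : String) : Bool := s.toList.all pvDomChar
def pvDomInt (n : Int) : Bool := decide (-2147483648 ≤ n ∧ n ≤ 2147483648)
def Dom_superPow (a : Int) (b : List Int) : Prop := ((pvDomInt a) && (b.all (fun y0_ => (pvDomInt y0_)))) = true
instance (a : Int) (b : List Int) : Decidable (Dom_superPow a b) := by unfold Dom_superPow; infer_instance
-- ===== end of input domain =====

-- B computes a^b mod 1337 by Horner's method over the digits left-to-right (result = result^10 * a^d mod 1337),
-- instead of A's right-to-left scan maintaining a repeatedly-10th-powered base; same cost, different accumulation.


-- ===== PORT A =====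
-- loop "for i in range(len(b)-1,-1,-1)": the digits are consumed last-to-first, i.e. in the order of b.reverse;
-- state (base, val) as in A.  'base ** b[i]' is base ^ b[i].toNat — exact for b[i] ≥ 0 (Pre_); for a negative
-- digit Python's ** yields a float, excluded by Pre_.
def superPowLoopA : Int → Int → List Int → Int
  | _, val, [] => val
  | base, val, d :: rest =>
      superPowLoopA (PySem.Int.mod (base ^ (10 : Nat)) 1337)
        (PySem.Int.mod (val * base ^ d.toNat) 1337) rest

def superPow (a : Int) (b : List Int) : Int :=
  superPowLoopA (PySem.Int.mod a 1337) 1 b.reverse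

-- ===== PORT B =====
-- one Horner step: result = pow(result, 10, 1337) * pow(a, d, 1337) % 1337  (pow(x,e,m) = PySem.Int.powMod)
def superPowStepB (a1 r d : Int) : Int :=
  PySem.Int.mod (PySem.Int.powMod r 10 1337 * PySem.Int.powMod a1 d.toNat 1337) 1337

def superPow_alt (a : Int) (b : List Int) : Int :=
  b.foldl (superPowStepB (PySem.Int.mod a 1337)) 1

-- ===== PRECONDITION & SPEC =====
-- Pre_ excludes lists containing a negative digit: there Python A returns a float (0.5-style), not an int of the
-- declared return type (and B's pow(a, d, 1337) may raise ValueError).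
def Pre_superPow (a : Int) (b : List Int) : Prop := ∀ d ∈ b, 0 ≤ d
instance (a : Int) (b : List Int) : Decidable (Pre_superPow a b) := by unfold Pre_superPow; infer_instance
def pvWitness_superPow : Int × List Int := (2, [1, 0])
def Spec_superPow (a : Int) (b : List Int) (out : Int) : Prop := out = superPow_alt a b
instance (a : Int) (b : List Int) (out : Int) : Decidable (Spec_superPow a b out) := by unfold Spec_superPow; infer_instance

-- ===== CLAIM (what is proved, stated in full; the proofs are below) =====
def Claim_equal_superPow : Prop := ∀ (a : Int) (b : List Int), Dom_superPow a b → Pre_superPow a b → Spec_superPow a b (superPow a b)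

-- ===== LEMMAS AND PROOFS =====

-- the numeric value of an LSB-first digit list (negative digits read as 0, matching both ports' ^ ·.toNat)
def digitsN : List Int → Nat
  | [] => 0
  | d :: t => d.toNat + 10 * digitsN t

theorem modP (x : Int) : PySem.Int.mod x 1337 = x % 1337 :=
  PySem.Int.mod_eq_emod_of_pos (by norm_num)

theorem castMod (x : Int) : (((x % 1337 : Int)) : ZMod 1337) = (x : ZMod 1337) := by
  have h := ZMod.intCast_mod x 1337
  push_cast at h ⊢
  exact h

theorem digitsN_append (xs : List Int) (d : Int) :
    digitsN (xs ++ [d]) = digitsN xs + d.toNat * 10 ^ xs.length := by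
  induction xs with
  | nil => simp [digitsN]
  | cons x t ih => simp [digitsN, ih, List.length_cons]; ring

theorem aLoop_cast (l : List Int) : ∀ base val : Int,
    ((superPowLoopA base val l : Int) : ZMod 1337)
      = (val : ZMod 1337) * (base : ZMod 1337) ^ digitsN l := by
  induction l with
  | nil => intro base val; simp [superPowLoopA, digitsN]
  | cons d t ih =>
      intro base val
      simp only [superPowLoopA, modP, ih, digitsN]
      push_cast [castMod]
      rw [pow_add, pow_mul]
      ring

theorem aLoop_range (l : List Int) (hl : l ≠ []) : ∀ base val : Int,
    0 ≤ superPowLoopA base val l ∧ superPowLoopA base val l < 1337 := by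
  induction l with
  | nil => exact absurd rfl hl
  | cons d t ih =>
      intro base val
      cases t with
      | nil =>
          simp only [superPowLoopA]
          exact ⟨PySem.Int.mod_nonneg _ (by norm_num), PySem.Int.mod_lt _ (by norm_num)⟩
      | cons e u => exact ih (by simp) _ _

theorem bFold_cast (a1 : Int) (l : List Int) : ∀ r : Int,
    ((l.foldl (superPowStepB a1) r : Int) : ZMod 1337)
      = (r : ZMod 1337) ^ (10 ^ l.length) * (a1 : ZMod 1337) ^ digitsN l.reverse := by
  induction l with
  | nil => intro r; simp [digitsN]
  | cons d t ih =>
      intro r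
      have hrev : digitsN (d :: t).reverse = digitsN t.reverse + d.toNat * 10 ^ t.length := by
        simpa using digitsN_append t.reverse d
      simp only [List.foldl_cons, ih, hrev, superPowStepB, PySem.Int.powMod, modP,
        List.length_cons]
      rw [castMod]
      push_cast [castMod]
      rw [mul_pow, ← pow_mul, ← pow_mul, pow_succ, mul_comm (10 ^ t.length) 10, pow_add, pow_mul]
      ring

theorem bFold_range (a1 : Int) (l : List Int) (hl : l ≠ []) : ∀ r : Int,
    0 ≤ l.foldl (superPowStepB a1) r ∧ l.foldl (superPowStepB a1) r < 1337 := by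
  induction l with
  | nil => exact absurd rfl hl
  | cons d t ih =>
      intro r
      cases t with
      | nil =>
          simp only [List.foldl_cons, List.foldl_nil, superPowStepB]
          exact ⟨PySem.Int.mod_nonneg _ (by norm_num), PySem.Int.mod_lt _ (by norm_num)⟩
      | cons e u => exact ih (by simp) _

theorem int_eq_of_cast_eq {x y : Int} (hx0 : 0 ≤ x) (hx1 : x < 1337) (hy0 : 0 ≤ y)
    (hy1 : y < 1337) (h : (x : ZMod 1337) = (y : ZMod 1337)) : x = y := by
  have hmod : x % (1337 : Int) = y % (1337 : Int) := by
    have := (ZMod.intCast_eq_intCast_iff' x y 1337).mp h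
    simpa using this
  rwa [Int.emod_eq_of_lt hx0 hx1, Int.emod_eq_of_lt hy0 hy1] at hmod

-- ===== VERDICT (by name: the statement is the Claim_ definition above) =====
theorem superPow_spec : Claim_equal_superPow := by
  intro a b _ _
  unfold Spec_superPow superPow superPow_alt
  cases b with
  | nil => rfl
  | cons d t =>
      set a1 := PySem.Int.mod a 1337 with ha1
      have hA := aLoop_range (d :: t).reverse (by simp) a1 1
      have hB := bFold_range a1 (d :: t) (by simp) 1
      apply int_eq_of_cast_eq hA.1 hA.2 hB.1 hB.2
      rw [aLoop_cast, bFold_cast]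
      simp
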